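-- pv_equiv track=rewrite | github.com/grid-control/grid-control | packages/grid_control_cms/lumi_tools.py | filter_lumi_filter
-- ===== SOURCE A (Python) =====
-- def filter_lumi_filter(run_list, run_lumi_range_list):
-- 	""" Filter run_lumi_range_list for entries that contain the given runs
-- 	>>> test_run_lumi_range_list = [([1, None], [2, None]), ([4, 1], [4, None]), ([5, 1], [None,3])]
-- 	>>> format_lumi(filter_lumi_filter([2,3,6], test_run_lumi_range_list))
-- 	['1:MIN-2:MAX', '5:1-9999999:3']
-- 	>>> format_lumi(filter_lumi_filter([2,3,6], [([1, 1], [2, 2]), ([3, 1], [5, 2]), ([5, 2], [7,3])]))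
-- 	['1:1-2:2', '3:1-5:2', '5:2-7:3']
-- 	"""
-- 	for run_lumi_range in run_lumi_range_list:
-- 		(run_start, run_end) = (run_lumi_range[0][0], run_lumi_range[1][0])
-- 		for run in run_list:
-- 			if (run_start is None) or (run >= run_start):
-- 				if (run_end is None) or (run <= run_end):
-- 					yield run_lumi_range
-- 					break
-- ===== SOURCE B (Python) =====
-- def filter_lumi_filter(run_list, run_lumi_range_list):
-- 	# Sort the runs once; for each range binary-search the smallest run >= start
-- 	# and check it against end.  O((R + L) log R) instead of A's O(R * L).
-- 	runs = sorted(run_list)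
-- 	n = len(runs)
-- 	for run_lumi_range in run_lumi_range_list:
-- 		(run_start, run_end) = (run_lumi_range[0][0], run_lumi_range[1][0])
-- 		if run_start is None:
-- 			i = 0
-- 		else:
-- 			lo, hi = 0, n
-- 			while lo < hi:
-- 				mid = (lo + hi) // 2
-- 				if runs[mid] < run_start:
-- 					lo = mid + 1
-- 				else:
-- 					hi = mid
-- 			i = lo
-- 		if i < n and (run_end is None or runs[i] <= run_end):
-- 			yield run_lumi_range
-- ===== Notes on version B (the rewrite author's own statement) =====
-- stated objective: faster
-- what changed: B sorts run_list once and, for each range, binary-searches the smallest run >= start and compares it with end, replacing A's linear scan of all runs per range.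
import Mathlib
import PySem

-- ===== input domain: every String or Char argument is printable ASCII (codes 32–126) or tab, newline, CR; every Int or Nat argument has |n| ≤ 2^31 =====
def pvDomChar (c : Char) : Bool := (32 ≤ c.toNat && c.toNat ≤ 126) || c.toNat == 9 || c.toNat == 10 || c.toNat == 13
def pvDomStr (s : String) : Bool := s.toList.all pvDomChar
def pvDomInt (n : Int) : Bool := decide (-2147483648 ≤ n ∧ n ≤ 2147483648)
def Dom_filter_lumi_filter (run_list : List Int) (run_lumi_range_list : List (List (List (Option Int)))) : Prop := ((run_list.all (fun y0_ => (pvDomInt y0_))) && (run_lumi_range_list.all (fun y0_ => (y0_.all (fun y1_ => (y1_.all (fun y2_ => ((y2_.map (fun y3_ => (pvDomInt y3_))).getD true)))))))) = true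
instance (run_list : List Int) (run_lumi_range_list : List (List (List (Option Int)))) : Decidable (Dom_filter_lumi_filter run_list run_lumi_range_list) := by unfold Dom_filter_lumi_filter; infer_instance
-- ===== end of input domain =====

-- B sorts the runs once and binary-searches each range instead of A's inner scan of all runs
-- (objective: faster, O((R+L) log R) vs O(R*L)); equivalence of the collected yields is proved below.

-- ===== PORT A =====
-- '(run_start is None) or (run >= run_start)'
def pvGeStart (run : Int) (run_start : Option Int) : Bool :=
  match run_start with | none => true | some v => decide (run ≥ v)

-- '(run_end is None) or (run <= run_end)'
def pvLeEnd (run : Int) (run_end : Option Int) : Bool :=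
  match run_end with | none => true | some v => decide (run ≤ v)

-- inner 'for run in run_list' loop with its break: returns true iff the loop reaches 'yield'
def pvInnerA (run_start run_end : Option Int) : List Int → Bool
  | [] => false
  | run :: rest =>
    if pvGeStart run run_start then
      if pvLeEnd run run_end then true
      else pvInnerA run_start run_end rest
    else pvInnerA run_start run_end rest

def filter_lumi_filter (run_list : List Int) (run_lumi_range_list : List (List (List (Option Int)))) : List (List (List (Option Int))) :=
  match run_lumi_range_list with
  | [] => []
  | r :: rest =>
    -- (run_start, run_end) = (r[0][0], r[1][0]); extraction failure = IndexError, excluded by Pre_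
    match (PySem.List.pyGet? r 0).bind (fun x => PySem.List.pyGet? x 0),
          (PySem.List.pyGet? r 1).bind (fun x => PySem.List.pyGet? x 0) with
    | some run_start, some run_end =>
      if pvInnerA run_start run_end run_list then r :: filter_lumi_filter run_list rest
      else filter_lumi_filter run_list rest
    | _, _ => filter_lumi_filter run_list rest

-- ===== PORT B =====
-- the hand-written 'while lo < hi' binary search of Source B (bisect_left)
-- structural recursion on fuel = hi - lo, which bounds the iteration count of the while loop
def pvBisectGo (runs : List Int) (x : Int) : Nat → Nat → Nat → Nat
  | 0, lo, _ => lo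
  | fuel + 1, lo, hi =>
    if lo < hi then
      let mid := (lo + hi) / 2
      if runs.getD mid 0 < x then pvBisectGo runs x fuel (mid + 1) hi
      else pvBisectGo runs x fuel lo mid
    else lo

def pvBisect (runs : List Int) (x : Int) (lo hi : Nat) : Nat :=
  pvBisectGo runs x (hi - lo) lo hi

-- the 'for run_lumi_range in run_lumi_range_list' loop of Source B, over the pre-sorted runs
def pvAltGo (runs : List Int) : List (List (List (Option Int))) → List (List (List (Option Int)))
  | [] => []
  | r :: rest =>
    match (PySem.List.pyGet? r 0).bind (fun x => PySem.List.pyGet? x 0) with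
    | none => pvAltGo runs rest
    | some run_start =>
    match (PySem.List.pyGet? r 1).bind (fun x => PySem.List.pyGet? x 0) with
    | none => pvAltGo runs rest
    | some run_end =>
      let i : Nat := match run_start with
        | none => 0
        | some v => pvBisect runs v 0 runs.length
      if decide (i < runs.length) &&
         (match run_end with | none => true | some v => decide (runs.getD i 0 ≤ v)) then
        r :: pvAltGo runs rest
      else pvAltGo runs rest

def filter_lumi_filter_alt (run_list : List Int) (run_lumi_range_list : List (List (List (Option Int)))) : List (List (List (Option Int))) :=
  pvAltGo (PySem.List.sorted run_list (fun x => x) false) run_lumi_range_list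

-- ===== PRECONDITION & SPEC =====
-- Pre_ excludes exactly the inputs on which Python A raises an IndexError while being
-- consumed: some range lacking a 0th/1st entry or whose 0th/1st entry is an empty list.
def Pre_filter_lumi_filter (run_list : List Int) (run_lumi_range_list : List (List (List (Option Int)))) : Prop :=
  ∀ r ∈ run_lumi_range_list, 2 ≤ r.length ∧ r.getD 0 [] ≠ [] ∧ r.getD 1 [] ≠ []
instance (run_list : List Int) (run_lumi_range_list : List (List (List (Option Int)))) : Decidable (Pre_filter_lumi_filter run_list run_lumi_range_list) := by unfold Pre_filter_lumi_filter; infer_instance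

def pvWitness_filter_lumi_filter : List Int × List (List (List (Option Int))) :=
  ([2, 3, 6], [[[some 1, none], [some 2, none]], [[some 4, some 1], [some 4, none]], [[some 5, some 1], [none, some 3]]])

def Spec_filter_lumi_filter (run_list : List Int) (run_lumi_range_list : List (List (List (Option Int)))) (out : List (List (List (Option Int)))) : Prop := out = filter_lumi_filter_alt run_list run_lumi_range_list
instance (run_list : List Int) (run_lumi_range_list : List (List (List (Option Int)))) (out : List (List (List (Option Int)))) : Decidable (Spec_filter_lumi_filter run_list run_lumi_range_list out) := by unfold Spec_filter_lumi_filter; infer_instance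

-- ===== CLAIM (what is proved, stated in full; the proofs are below) =====
def Claim_equal_filter_lumi_filter : Prop := ∀ (run_list : List Int) (run_lumi_range_list : List (List (List (Option Int)))), Dom_filter_lumi_filter run_list run_lumi_range_list → Pre_filter_lumi_filter run_list run_lumi_range_list → Spec_filter_lumi_filter run_list run_lumi_range_list (filter_lumi_filter run_list run_lumi_range_list)

-- ===== LEMMAS AND PROOFS =====

-- proof-only helper: B's per-range test as one boolean
def pvBCond (runs : List Int) (s e : Option Int) : Bool :=
  decide ((match s with
      | none => 0
      | some v => pvBisect runs v 0 runs.length) < runs.length) &&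
  (match e with
    | none => true
    | some v => decide (runs.getD (match s with
        | none => 0
        | some v => pvBisect runs v 0 runs.length) 0 ≤ v))

-- A's inner loop returns true iff some run satisfies both bounds
theorem pvInnerA_iff (s e : Option Int) (l : List Int) :
    pvInnerA s e l = true ↔ ∃ x ∈ l, pvGeStart x s = true ∧ pvLeEnd x e = true := by
  induction l with
  | nil => simp [pvInnerA]
  | cons run rest ih =>
    simp only [pvInnerA]
    by_cases h1 : pvGeStart run s = true
    · rw [if_pos h1]
      by_cases h2 : pvLeEnd run e = true
      · rw [if_pos h2]
        exact iff_of_true rfl ⟨run, by simp, h1, h2⟩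
      · rw [if_neg h2, ih]
        constructor
        · rintro ⟨x, hx, a, b⟩; exact ⟨x, by simp [hx], a, b⟩
        · rintro ⟨x, hx, a, b⟩
          rcases List.mem_cons.mp hx with rfl | hx
          · exact absurd b h2
          · exact ⟨x, hx, a, b⟩
    · rw [if_neg h1, ih]
      constructor
      · rintro ⟨x, hx, a, b⟩; exact ⟨x, by simp [hx], a, b⟩
      · rintro ⟨x, hx, a, b⟩
        rcases List.mem_cons.mp hx with rfl | hx
        · exact absurd a h1
        · exact ⟨x, hx, a, b⟩

theorem pvBisectGo_spec (runs : List Int) (v : Int) (hp : runs.Pairwise (· ≤ ·)) :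
    ∀ fuel lo hi, hi - lo ≤ fuel → hi ≤ runs.length → lo ≤ hi →
    (∀ j (hj : j < runs.length), j < lo → runs[j] < v) →
    (∀ j (hj : j < runs.length), hi ≤ j → v ≤ runs[j]) →
    lo ≤ pvBisectGo runs v fuel lo hi ∧ pvBisectGo runs v fuel lo hi ≤ hi ∧
    (∀ j (hj : j < runs.length), j < pvBisectGo runs v fuel lo hi → runs[j] < v) ∧
    (∀ j (hj : j < runs.length), pvBisectGo runs v fuel lo hi ≤ j → v ≤ runs[j]) := by
  intro fuel
  induction fuel with
  | zero =>
    intro lo hi hfuel hhi hlo hleft hright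
    have heq : lo = hi := by omega
    simp only [pvBisectGo]
    exact ⟨Nat.le_refl _, by omega, fun j hj hjlt => hleft j hj hjlt,
      fun j hj hjl => hright j hj (by omega)⟩
  | succ fuel ih =>
    intro lo hi hfuel hhi hlo hleft hright
    simp only [pvBisectGo]
    by_cases h : lo < hi
    · rw [if_pos h]
      have hmidlen : (lo + hi) / 2 < runs.length := by omega
      have hmidE : runs.getD ((lo + hi) / 2) 0 = runs[(lo + hi) / 2] :=
        List.getD_eq_getElem runs 0 hmidlen
      by_cases hc : runs.getD ((lo + hi) / 2) 0 < v
      · rw [if_pos hc]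
        rw [hmidE] at hc
        obtain ⟨h1, h2, h3, h4⟩ := ih ((lo + hi) / 2 + 1) hi (by omega) hhi (by omega)
          (fun j hj hjlt => by
            rcases Nat.lt_or_ge j ((lo + hi) / 2) with hjm | hjm
            · have hle : runs[j] ≤ runs[(lo + hi) / 2] :=
                List.pairwise_iff_getElem.mp hp j ((lo + hi) / 2) hj hmidlen hjm
              omega
            · have hje : j = (lo + hi) / 2 := by omega
              subst hje; omega)
          hright
        exact ⟨by omega, h2, h3, h4⟩
      · rw [if_neg hc]
        rw [hmidE] at hc
        obtain ⟨h1, h2, h3, h4⟩ := ih lo ((lo + hi) / 2) (by omega) (by omega) (by omega) hleft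
          (fun j hj hjm => by
            have hle : runs[(lo + hi) / 2] ≤ runs[j] := by
              rcases Nat.lt_or_ge ((lo + hi) / 2) j with hcc | hcc
              · exact List.pairwise_iff_getElem.mp hp ((lo + hi) / 2) j hmidlen hj hcc
              · have hje : (lo + hi) / 2 = j := by omega
                subst hje; omega
            omega)
        exact ⟨h1, by omega, h3, h4⟩
    · rw [if_neg h]
      exact ⟨Nat.le_refl _, by omega, fun j hj hjlt => hleft j hj hjlt,
        fun j hj hjl => hright j hj (by omega)⟩

theorem pvBisect_spec (runs : List Int) (v : Int) (hp : runs.Pairwise (· ≤ ·)) :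
    ∀ lo hi, hi ≤ runs.length → lo ≤ hi →
    (∀ j (hj : j < runs.length), j < lo → runs[j] < v) →
    (∀ j (hj : j < runs.length), hi ≤ j → v ≤ runs[j]) →
    lo ≤ pvBisect runs v lo hi ∧ pvBisect runs v lo hi ≤ hi ∧
    (∀ j (hj : j < runs.length), j < pvBisect runs v lo hi → runs[j] < v) ∧
    (∀ j (hj : j < runs.length), pvBisect runs v lo hi ≤ j → v ≤ runs[j]) := by
  intro lo hi hhi hlo hleft hright
  exact pvBisectGo_spec runs v hp (hi - lo) lo hi (Nat.le_refl _) hhi hlo hleft hright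

-- B's per-range test over the sorted runs decides the same existential as A's inner loop
theorem pvBCond_iff (runs : List Int) (hp : runs.Pairwise (· ≤ ·)) (s e : Option Int) :
    pvBCond runs s e = true ↔
    ∃ x ∈ runs, pvGeStart x s = true ∧ pvLeEnd x e = true := by
  unfold pvBCond
  set i : Nat := (match s with | none => 0 | some v => pvBisect runs v 0 runs.length) with hi
  have hspec : ∀ v, s = some v →
      i ≤ runs.length ∧ (∀ j (hj : j < runs.length), j < i → runs[j] < v) ∧
      (∀ j (hj : j < runs.length), i ≤ j → v ≤ runs[j]) := by
    intro v hv
    have h := pvBisect_spec runs v hp 0 runs.length (Nat.le_refl _) (Nat.zero_le _)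
      (fun j hj hjl => by omega) (fun j hj hjl => by omega)
    rw [hi, hv]
    exact ⟨h.2.1, h.2.2.1, h.2.2.2⟩
  constructor
  · intro h
    rw [Bool.and_eq_true, decide_eq_true_iff] at h
    obtain ⟨hilen, hcond⟩ := h
    have hgd : runs.getD i 0 = runs[i] := List.getD_eq_getElem runs 0 hilen
    refine ⟨runs[i], List.getElem_mem hilen, ?_, ?_⟩
    · rcases s with _ | v
      · rfl
      · simp only [pvGeStart, decide_eq_true_iff, ge_iff_le]
        exact (hspec v rfl).2.2 i hilen (Nat.le_refl _)
    · rcases e with _ | v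
      · rfl
      · simp only [pvLeEnd, decide_eq_true_iff]
        rw [decide_eq_true_iff] at hcond; rw [hgd] at hcond; exact hcond
  · rintro ⟨x, hx, h1, h2⟩
    obtain ⟨k, hk, hxk⟩ := List.getElem_of_mem hx
    have hki : i ≤ k := by
      rcases s with _ | v
      · simp [hi]
      · by_contra hc
        have hlt := (hspec v rfl).2.1 k hk (by omega)
        simp only [pvGeStart, decide_eq_true_iff, ge_iff_le] at h1
        omega
    have hilen : i < runs.length := by omega
    have hgd : runs.getD i 0 = runs[i] := List.getD_eq_getElem runs 0 hilen
    have hix : runs[i] ≤ x := by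
      rcases Nat.lt_or_ge i k with hc | hc
      · rw [← hxk]; exact List.pairwise_iff_getElem.mp hp i k hilen hk hc
      · have hik : i = k := by omega
        subst hik; omega
    rw [Bool.and_eq_true, decide_eq_true_iff]
    refine ⟨hilen, ?_⟩
    rcases e with _ | v
    · rfl
    · simp only [pvLeEnd, decide_eq_true_iff] at h2
      rw [decide_eq_true_iff, hgd]; omega

theorem pv_main (run_list : List Int) (l : List (List (List (Option Int)))) :
    filter_lumi_filter run_list l = filter_lumi_filter_alt run_list l := by
  unfold filter_lumi_filter_alt
  set runs := PySem.List.sorted run_list (fun x => x) false with hruns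
  have hp : runs.Pairwise (· ≤ ·) := PySem.List.sorted_pairwise run_list (fun x => x)
  have hperm : runs.Perm run_list := PySem.List.sorted_perm run_list (fun x => x) false
  induction l with
  | nil => simp [filter_lumi_filter, pvAltGo]
  | cons r rest ih =>
    simp only [filter_lumi_filter, pvAltGo]
    generalize (PySem.List.pyGet? r 0).bind (fun x => PySem.List.pyGet? x 0) = os
    generalize (PySem.List.pyGet? r 1).bind (fun x => PySem.List.pyGet? x 0) = oe
    rcases os with _ | s <;> rcases oe with _ | e
    · exact ih
    · exact ih
    · exact ih
    · have hcond : pvInnerA s e run_list = pvBCond runs s e := by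
        rw [Bool.eq_iff_iff, pvInnerA_iff s e run_list, pvBCond_iff runs hp s e]
        constructor
        · rintro ⟨x, hx, h1, h2⟩; exact ⟨x, hperm.mem_iff.mpr hx, h1, h2⟩
        · rintro ⟨x, hx, h1, h2⟩; exact ⟨x, hperm.mem_iff.mp hx, h1, h2⟩
      show (if pvInnerA s e run_list = true then r :: filter_lumi_filter run_list rest
            else filter_lumi_filter run_list rest) =
           (if pvBCond runs s e = true then r :: pvAltGo runs rest else pvAltGo runs rest)
      rw [hcond, ih]

-- ===== VERDICT (by name: the statement is the Claim_ definition above) =====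
theorem filter_lumi_filter_spec : Claim_equal_filter_lumi_filter := by
  intro run_list l _ _
  exact pv_main run_list l
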